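-- pv_equiv track=rewrite | github.com/Urinx/SomeCodes | Bioinformatics/genome/Replication.py | FssterSymbolArray
-- ===== SOURCE A (Python) =====
-- def PatternCount(Pattern, Text):
--     count = 0
--     for i in range(len(Text)-len(Pattern)+1):
--         if Text[i:i+len(Pattern)] == Pattern:
--             count += 1
--     return count
--
-- def FssterSymbolArray(Genome, symbol):
--     array = {}
--     n = len(Genome)
--     ExtendedGenome = Genome + Genome[0:n//2]
--     array[0] = PatternCount(symbol, Genome[0:n//2])
--     for i in range(1,n):
--         array[i] = array[i-1]
--         if ExtendedGenome[i-1] == symbol: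
--             array[i] = array[i] - 1
--         if ExtendedGenome[i+(n//2)-1] == symbol:
--             array[i] = array[i] + 1
--     return array
-- ===== SOURCE B (Python) =====
-- def PatternCount(Pattern, Text):
--     count = 0
--     for i in range(len(Text)-len(Pattern)+1):
--         if Text[i:i+len(Pattern)] == Pattern:
--             count += 1
--     return count
--
-- def FssterSymbolArray(Genome, symbol):
--     n = len(Genome)
--     h = n // 2
--     ext = Genome + Genome[:h]
--     base = PatternCount(symbol, Genome[:h])
--     # prefix table: P[j] = number of positions < j in ext holding the symbol character
--     P = [0]
--     for ch in ext:
--         P.append(P[-1] + (1 if ch == symbol else 0))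
--     # window [i, i+h) loses the P[i] matches before i and gains those in [h, i+h)
--     return {i: base - P[i] + (P[i + h] - P[h]) for i in range(n)}
-- ===== Notes on version B (the rewrite author's own statement) =====
-- stated objective: alternative
-- what changed: B replaces A's dict built by a sequential running update (each entry derived from the previous with +/-1 corrections) with a prefix-count table over the extended genome built once and read off by direct lookups; Pre_ excludes the empty genome, where A's unconditional array[0] assignment emits a key for a window that does not exist (B returns an empty dict there).
-- outside the precondition, e.g. on FssterSymbolArray('', 'A'): A returns {0: 0}, B returns {}
import Mathlib
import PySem

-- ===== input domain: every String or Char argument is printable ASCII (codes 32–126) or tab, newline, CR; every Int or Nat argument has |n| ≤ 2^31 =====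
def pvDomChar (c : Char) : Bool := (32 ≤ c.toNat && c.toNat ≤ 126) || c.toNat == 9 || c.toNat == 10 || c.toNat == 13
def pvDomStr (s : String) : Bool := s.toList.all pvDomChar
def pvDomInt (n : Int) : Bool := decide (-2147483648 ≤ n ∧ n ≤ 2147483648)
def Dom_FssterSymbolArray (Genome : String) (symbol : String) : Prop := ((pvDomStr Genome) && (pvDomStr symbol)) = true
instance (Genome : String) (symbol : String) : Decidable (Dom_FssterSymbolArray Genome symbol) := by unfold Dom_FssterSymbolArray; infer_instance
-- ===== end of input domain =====

-- B replaces A's sequential running update with a precomputed prefix-count table read off by direct lookups (alternative decomposition, same cost).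

-- ===== PORT A =====
-- shared helper: the module's PatternCount, identical in both Pythons (ported on List Char)
def PatternCount (Pattern : List Char) (Text : List Char) : Int :=
  (PySem.List.pyRange 0 ((Text.length : Int) - (Pattern.length : Int) + 1) 1).foldl
    (fun count i =>
      if PySem.List.slice Text (some i) (some (i + (Pattern.length : Int))) = Pattern then count + 1
      else count) 0

def FssterSymbolArray (Genome : String) (symbol : String) : List (Int × Int) :=
  let g := Genome.toList
  let sym := symbol.toList
  let n : Int := (g.length : Int)
  let ext := g ++ PySem.List.slice g (some 0) (some (PySem.Int.floordiv n 2))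
  -- array = {}; array[0] = PatternCount(symbol, Genome[0:n//2])
  let d0 : PySem.Dict Int Int :=
    PySem.Dict.empty.insert 0 (PatternCount sym (PySem.List.slice g (some 0) (some (PySem.Int.floordiv n 2))))
  let d := (PySem.List.pyRange 1 n 1).foldl (fun d i =>
    -- array[i] = array[i-1]   (key i-1 is always present, so the lookup's default is never used)
    let d := d.insert i (d.getD (i - 1) 0)
    -- ExtendedGenome[i-1] is a one-character string (index always in range); it equals symbol iff symbol is that single char
    let d := if (PySem.List.pyGet? ext (i - 1)).map (fun c => [c]) = some sym then
               d.insert i (d.getD i 0 - 1) else d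
    let d := if (PySem.List.pyGet? ext (i + PySem.Int.floordiv n 2 - 1)).map (fun c => [c]) = some sym then
               d.insert i (d.getD i 0 + 1) else d
    d) d0
  d.items

-- ===== PORT B =====
def FssterSymbolArray_alt (Genome : String) (symbol : String) : List (Int × Int) :=
  let g := Genome.toList
  let sym := symbol.toList
  let n : Int := (g.length : Int)
  let h := PySem.Int.floordiv n 2
  let ext := g ++ PySem.List.slice g none (some h)
  let base := PatternCount sym (PySem.List.slice g none (some h))
  -- P = [0]; for ch in ext: P.append(P[-1] + (1 if ch == symbol else 0))
  let P := ext.foldl (fun P ch => P ++ [PySem.List.pyGetD P (-1) 0 + (if [ch] = sym then 1 else 0)]) [0]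
  -- {i: base - P[i] + (P[i+h] - P[h]) for i in range(n)}   (all these indices are in range)
  (PySem.List.pyRange 0 n 1).map (fun i =>
    (i, base - PySem.List.pyGetD P i 0 + (PySem.List.pyGetD P (i + h) 0 - PySem.List.pyGetD P h 0)))

-- ===== PRECONDITION & SPEC =====
-- Pre_ excludes the empty genome: there A's unconditional array[0] assignment emits a key for a
-- window that does not exist (A returns {0: count}), while B naturally returns an empty dict.
def Pre_FssterSymbolArray (Genome : String) (symbol : String) : Prop := Genome ≠ ""
instance (Genome : String) (symbol : String) : Decidable (Pre_FssterSymbolArray Genome symbol) := by unfold Pre_FssterSymbolArray; infer_instance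
def pvWitness_FssterSymbolArray : String × String := ("ACGT", "A")
def Spec_FssterSymbolArray (Genome : String) (symbol : String) (out : List (Int × Int)) : Prop := out = FssterSymbolArray_alt Genome symbol
instance (Genome : String) (symbol : String) (out : List (Int × Int)) : Decidable (Spec_FssterSymbolArray Genome symbol out) := by unfold Spec_FssterSymbolArray; infer_instance

-- ===== CLAIM (what is proved, stated in full; the proofs are below) =====
def Claim_equal_FssterSymbolArray : Prop := ∀ (Genome : String) (symbol : String), Dom_FssterSymbolArray Genome symbol → Pre_FssterSymbolArray Genome symbol → Spec_FssterSymbolArray Genome symbol (FssterSymbolArray Genome symbol)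

-- ===== LEMMAS AND PROOFS =====

-- prefix count of single-character matches among the first j characters of E
def pvPval (sym : List Char) (E : List Char) (j : Nat) : Int :=
  ((E.take j).countP (fun c => decide ([c] = sym)) : Int)

lemma pvPval_zero (sym E : List Char) : pvPval sym E 0 = 0 := by
  simp [pvPval]

lemma pvPval_succ (sym E : List Char) (j : Nat) (hj : j < E.length) :
    pvPval sym E (j + 1) = pvPval sym E j + (if [E[j]] = sym then 1 else 0) := by
  unfold pvPval
  have ht : E.take (j + 1) = E.take j ++ [E[j]] := by
    rw [List.take_add_one, List.getElem?_eq_getElem hj]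
    rfl
  rw [ht, List.countP_append, List.countP_singleton]
  simp only [decide_eq_true_eq]
  push_cast
  ring

-- the loop body of A, as a single insert
def pvBody (sym E : List Char) (hI : Int) : PySem.Dict Int Int → Int → PySem.Dict Int Int := fun d i =>
  let d := d.insert i (d.getD (i - 1) 0)
  let d := if (PySem.List.pyGet? E (i - 1)).map (fun c => [c]) = some sym then
             d.insert i (d.getD i 0 - 1) else d
  let d := if (PySem.List.pyGet? E (i + hI - 1)).map (fun c => [c]) = some sym then
             d.insert i (d.getD i 0 + 1) else d
  d

lemma pvBody_eq (sym E : List Char) (hI : Int) (d : PySem.Dict Int Int) (i : Int) :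
    pvBody sym E hI d i
      = d.insert i (d.getD (i - 1) 0
          - (if (PySem.List.pyGet? E (i - 1)).map (fun c => [c]) = some sym then 1 else 0)
          + (if (PySem.List.pyGet? E (i + hI - 1)).map (fun c => [c]) = some sym then 1 else 0)) := by
  unfold pvBody
  split_ifs <;>
    simp [PySem.Dict.getD_insert_self, PySem.Dict.insert_insert_self]

-- the indicator A tests, at an in-range natural index
lemma pvIte_nat (sym E : List Char) (j : Nat) (hj : j < E.length) :
    (if (PySem.List.pyGet? E (j : Int)).map (fun c => [c]) = some sym then (1 : Int) else 0)
      = (if [E[j]] = sym then 1 else 0) := by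
  rw [PySem.List.pyGet?_natCast, List.getElem?_eq_getElem hj]
  simp

-- B's prefix-table loop, characterised
lemma pvFoldP (sym : List Char) (l : List Char) (A : List Int) (v : Int) :
    l.foldl (fun P ch => P ++ [PySem.List.pyGetD P (-1) 0 + (if [ch] = sym then 1 else 0)]) (A ++ [v])
      = (A ++ [v]) ++ (List.range l.length).map
          (fun j => v + ((l.take (j + 1)).countP (fun c => decide ([c] = sym)) : Int)) := by
  induction l generalizing A v with
  | nil => simp
  | cons c t ih =>
    rw [List.foldl_cons, PySem.List.pyGetD_neg_one_append_singleton]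
    rw [ih (A ++ [v]) (v + (if [c] = sym then 1 else 0))]
    rw [List.length_cons, List.range_succ_eq_map, List.map_cons, List.map_map, List.append_assoc]
    congr 1
    rw [List.singleton_append]
    congr 1
    · simp [List.countP_cons]
    · apply List.map_congr_left
      intro j _
      simp only [Function.comp_def, Nat.succ_eq_add_one, List.take_succ_cons, List.countP_cons,
        decide_eq_true_eq]
      push_cast
      ring

lemma pvPtable (sym E : List Char) :
    E.foldl (fun P ch => P ++ [PySem.List.pyGetD P (-1) 0 + (if [ch] = sym then 1 else 0)]) [0]
      = 0 :: (List.range E.length).map (fun j => pvPval sym E (j + 1)) := by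
  have h := pvFoldP sym E [] 0
  simpa [pvPval] using h

lemma pvPget (sym E : List Char) (k : Nat) (hk : k ≤ E.length) :
    PySem.List.pyGetD (0 :: (List.range E.length).map (fun j => pvPval sym E (j + 1))) (k : Int) 0
      = pvPval sym E k := by
  rw [PySem.List.pyGetD_natCast]
  cases k with
  | zero => simp [pvPval]
  | succ j =>
      rw [List.getD_cons_succ]
      rw [List.getD_eq_getElem?_getD, List.getElem?_map, List.getElem?_range (by omega : j < E.length)]
      simp

-- A's loop invariant: after processing 1..m the dict lists (k, base - P k + P (k+h') - P h') for k = 0..m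
lemma pvLoop (sym E : List Char) (base : Int) (n' h' : Nat) (hE : E.length = n' + h')
    (m : Nat) (hm : m < n') :
    (((PySem.List.pyRange 1 (1 + (m : Int)) 1).foldl (pvBody sym E (h' : Int))
        (PySem.Dict.empty.insert 0 base)).items
      = (List.range (m + 1)).map
          (fun (k : Nat) => ((k : Int), base - pvPval sym E k + pvPval sym E (k + h') - pvPval sym E h')))
    ∧ ((PySem.List.pyRange 1 (1 + (m : Int)) 1).foldl (pvBody sym E (h' : Int))
        (PySem.Dict.empty.insert 0 base)).getD (m : Int) 0
      = base - pvPval sym E m + pvPval sym E (m + h') - pvPval sym E h' := by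
  have hd0 : (PySem.Dict.empty.insert 0 base : PySem.Dict Int Int).items = [(0, base)] := rfl
  induction m with
  | zero =>
      rw [show (1 + ((0 : Nat) : Int)) = 1 by norm_num, PySem.List.pyRange_one_eq_nil le_rfl]
      rw [List.foldl_nil]
      constructor
      · rw [hd0]
        simp [List.range_one, pvPval_zero]
      · rw [show ((0 : Nat) : Int) = 0 from rfl, PySem.Dict.getD_insert_self]
        simp [pvPval_zero]
  | succ m ih =>
      have hm' : m < n' := by omega
      obtain ⟨ihItems, ihGet⟩ := ih hm'
      have hsplit : PySem.List.pyRange 1 (1 + ((m + 1 : Nat) : Int)) 1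
          = PySem.List.pyRange 1 (1 + (m : Int)) 1 ++ [1 + (m : Int)] := by
        rw [show (1 + ((m + 1 : Nat) : Int)) = (1 + (m : Int)) + 1 by push_cast; ring]
        exact PySem.List.pyRange_one_succ_right (by omega)
      rw [hsplit, List.foldl_append, List.foldl_cons, List.foldl_nil, pvBody_eq]
      have hidx1 : (1 + (m : Int)) - 1 = ((m : Nat) : Int) := by ring
      have hidx2 : (1 + (m : Int)) + (h' : Int) - 1 = (((m + h' : Nat)) : Int) := by push_cast; ring
      have hb1 : m < E.length := by omega
      have hb2 : m + h' < E.length := by omega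
      rw [hidx1, hidx2, ihGet, pvIte_nat sym E m hb1, pvIte_nat sym E (m + h') hb2]
      have hval : base - pvPval sym E m + pvPval sym E (m + h') - pvPval sym E h'
            - (if [E[m]] = sym then (1 : Int) else 0)
            + (if [E[m + h']] = sym then (1 : Int) else 0)
          = base - pvPval sym E (m + 1) + pvPval sym E (m + 1 + h') - pvPval sym E h' := by
        rw [show m + 1 + h' = (m + h') + 1 by omega, pvPval_succ sym E (m + h') hb2,
            pvPval_succ sym E m hb1]
        split_ifs <;> ring
      rw [hval]
      have hfresh : ((PySem.List.pyRange 1 (1 + (m : Int)) 1).foldl (pvBody sym E (h' : Int))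
          (PySem.Dict.empty.insert 0 base)).contains (1 + (m : Int)) = false := by
        rw [PySem.Dict.contains_eq_decide_mem_keys]
        simp only [PySem.Dict.keys, ihItems, List.map_map, decide_eq_false_iff_not,
          List.mem_map, List.mem_range, Function.comp_def]
        rintro ⟨k, hk, hkeq⟩
        omega
      constructor
      · rw [PySem.Dict.items_insert_of_not_contains _ _ hfresh, ihItems]
        have hc : ((m + 1 : Nat) : Int) = 1 + (m : Int) := by push_cast; ring
        have hR : List.range (m + 1 + 1) = List.range (m + 1) ++ [m + 1] := List.range_succ
        rw [hR, List.map_append, List.map_singleton]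
        simp [hc]
      · rw [show (((m + 1 : Nat)) : Int) = 1 + (m : Int) by push_cast; ring]
        rw [PySem.Dict.getD_insert_self]

-- A's whole loop, in the common normal form (nonempty genome)
lemma pvAEq (sym E : List Char) (base : Int) (n' h' : Nat) (hElen : E.length = n' + h')
    (hn : 1 ≤ n') :
    ((PySem.List.pyRange 1 (n' : Int) 1).foldl (pvBody sym E (h' : Int))
        (PySem.Dict.empty.insert 0 base)).items
      = (List.range n').map
          (fun (k : Nat) => ((k : Int), base - pvPval sym E k + pvPval sym E (k + h') - pvPval sym E h')) := by
  obtain ⟨m, rfl⟩ : ∃ m, n' = m + 1 := ⟨n' - 1, by omega⟩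
  rw [show ((m + 1 : Nat) : Int) = 1 + (m : Int) by push_cast; ring]
  exact (pvLoop sym E base (m + 1) h' hElen m (by omega)).1

-- B's comprehension, in the common normal form
lemma pvAltEq (sym E : List Char) (base : Int) (n' h' : Nat) (hElen : E.length = n' + h')
    (hh : h' ≤ n') :
    (PySem.List.pyRange 0 (n' : Int) 1).map (fun i =>
        (i, base
          - PySem.List.pyGetD (0 :: (List.range E.length).map (fun j => pvPval sym E (j + 1))) i 0
          + (PySem.List.pyGetD (0 :: (List.range E.length).map (fun j => pvPval sym E (j + 1))) (i + (h' : Int)) 0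
             - PySem.List.pyGetD (0 :: (List.range E.length).map (fun j => pvPval sym E (j + 1))) (h' : Int) 0)))
      = (List.range n').map
          (fun (k : Nat) => ((k : Int), base - pvPval sym E k + pvPval sym E (k + h') - pvPval sym E h')) := by
  rw [PySem.List.pyRange_one, show (((n' : Int) - 0).toNat) = n' by omega, List.map_map]
  apply List.map_congr_left
  intro k hk
  rw [List.mem_range] at hk
  simp only [Function.comp_def, zero_add]
  rw [show ((k : Int) + (h' : Int)) = ((k + h' : Nat) : Int) by push_cast; ring]
  rw [pvPget sym E k (by omega), pvPget sym E (k + h') (by omega), pvPget sym E h' (by omega)]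
  congr 1
  ring

-- the two ports, after floordiv/slice normalisation, agree (nonempty genome)
lemma pvConcrete (g sym : List Char) (hg : 1 ≤ g.length) :
    ((PySem.List.pyRange 1 ((g.length : Nat) : Int) 1).foldl
        (pvBody sym (g ++ g.take (g.length / 2)) ((g.length / 2 : Nat) : Int))
        (PySem.Dict.empty.insert 0 (PatternCount sym (g.take (g.length / 2))))).items
      = (PySem.List.pyRange 0 ((g.length : Nat) : Int) 1).map (fun i =>
          (i, PatternCount sym (g.take (g.length / 2))
            - PySem.List.pyGetD ((g ++ g.take (g.length / 2)).foldl
                (fun P ch => P ++ [PySem.List.pyGetD P (-1) 0 + (if [ch] = sym then 1 else 0)]) [0]) i 0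
            + (PySem.List.pyGetD ((g ++ g.take (g.length / 2)).foldl
                (fun P ch => P ++ [PySem.List.pyGetD P (-1) 0 + (if [ch] = sym then 1 else 0)]) [0])
                (i + ((g.length / 2 : Nat) : Int)) 0
               - PySem.List.pyGetD ((g ++ g.take (g.length / 2)).foldl
                (fun P ch => P ++ [PySem.List.pyGetD P (-1) 0 + (if [ch] = sym then 1 else 0)]) [0])
                ((g.length / 2 : Nat) : Int) 0))) := by
  have hh : g.length / 2 ≤ g.length := Nat.div_le_self _ _
  have hElen : (g ++ g.take (g.length / 2)).length = g.length + g.length / 2 := by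
    simp [List.length_take]
    omega
  rw [pvPtable sym (g ++ g.take (g.length / 2))]
  rw [pvAEq sym (g ++ g.take (g.length / 2)) (PatternCount sym (g.take (g.length / 2)))
        g.length (g.length / 2) hElen hg]
  rw [pvAltEq sym (g ++ g.take (g.length / 2)) (PatternCount sym (g.take (g.length / 2)))
        g.length (g.length / 2) hElen hh]

theorem FssterSymbolArray_spec : Claim_equal_FssterSymbolArray := by
  intro Genome symbol _ hpre
  unfold Spec_FssterSymbolArray FssterSymbolArray FssterSymbolArray_alt
  dsimp only
  have hg : 1 ≤ Genome.toList.length := by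
    have hne : Genome.toList ≠ [] := by simpa [String.toList_eq_nil_iff] using hpre
    have := List.length_pos_iff.mpr hne
    omega
  have hfd : PySem.Int.floordiv ((Genome.toList.length : Nat) : Int) 2
      = ((Genome.toList.length / 2 : Nat) : Int) := by
    rw [PySem.Int.floordiv_eq_iff_of_pos (by norm_num)]
    omega
  rw [hfd]
  simp only [PySem.List.slice_zero_start, PySem.List.slice_to_natCast]
  exact pvConcrete Genome.toList symbol.toList hg
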